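-- pv_equiv track=rewrite | github.com/Creamy-pie-96/Pythonic | scripts/gen_dispatch_stubs.py | get_common_type
-- ===== SOURCE A (Python) =====
-- cpp_types = {
--     "int": "int", "float": "float", "string": "std::string", "bool": "bool",
--     "double": "double", "long": "long", "long_long": "long long",
--     "long_double": "long double", "uint": "unsigned int", "ulong": "unsigned long",
--     "ulong_long": "unsigned long long", "list": "List", "set": "Set",
--     "dict": "Dict", "orderedset": "OrderedSet", "ordereddict": "OrderedDict", "graph": "Graph"
-- }
--
-- def get_common_type(t1, t2):
--     # Treat bool as integer (0/1) for promotion purposes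
--     if t1 == 'bool' and t2 == 'bool':
--         return 'int'
--     if t1 == 'bool':
--         return get_common_type('int', t2)
--     if t2 == 'bool':
--         return get_common_type(t1, 'int')
--     if t1 == t2:
--         return cpp_types[t1]
--     if t1 == "long_double" or t2 == "long_double": return "long double"
--     if t1 == "double" or t2 == "double": return "double"
--     if t1 == "float" or t2 == "float": return "float"
--     if t1 == "long_long" or t2 == "long_long": return "long long"
--     if t1 == "ulong_long" or t2 == "ulong_long": return "unsigned long long"
--     if t1 == "long" or t2 == "long": return "long"
--     if t1 == "ulong" or t2 == "ulong": return "unsigned long"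
--     if t1 == "int" or t2 == "int": return "int"
--     if t1 == "uint" or t2 == "uint": return "unsigned int"
--
--     return "long long" # Default promotion
-- ===== SOURCE B (Python) =====
-- cpp_types = {
--     "int": "int", "float": "float", "string": "std::string", "bool": "bool",
--     "double": "double", "long": "long", "long_long": "long long",
--     "long_double": "long double", "uint": "unsigned int", "ulong": "unsigned long",
--     "ulong_long": "unsigned long long", "list": "List", "set": "Set",
--     "dict": "Dict", "orderedset": "OrderedSet", "ordereddict": "OrderedDict", "graph": "Graph"
-- }
--
-- _RANK = {"long_double": 9, "double": 8, "float": 7, "long_long": 6,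
--          "ulong_long": 5, "long": 4, "ulong": 3, "int": 2, "uint": 1}
--
-- def get_common_type(t1, t2):
--     # bool promotes to int
--     n1 = 'int' if t1 == 'bool' else t1
--     n2 = 'int' if t2 == 'bool' else t2
--     if n1 == n2:
--         return cpp_types[n1]
--     r1 = _RANK.get(n1, 0)
--     r2 = _RANK.get(n2, 0)
--     if r1 == 0 and r2 == 0:
--         return "long long"
--     return cpp_types[n1 if r1 > r2 else n2]
-- ===== Notes on version B (the rewrite author's own statement) =====
-- stated objective: idiomatic
-- what changed: Replaces the nine-branch sequential equality cascade (with recursive bool re-dispatch) by a bool-to-int normalization followed by a single precedence-rank table lookup and comparison.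
import Mathlib
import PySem

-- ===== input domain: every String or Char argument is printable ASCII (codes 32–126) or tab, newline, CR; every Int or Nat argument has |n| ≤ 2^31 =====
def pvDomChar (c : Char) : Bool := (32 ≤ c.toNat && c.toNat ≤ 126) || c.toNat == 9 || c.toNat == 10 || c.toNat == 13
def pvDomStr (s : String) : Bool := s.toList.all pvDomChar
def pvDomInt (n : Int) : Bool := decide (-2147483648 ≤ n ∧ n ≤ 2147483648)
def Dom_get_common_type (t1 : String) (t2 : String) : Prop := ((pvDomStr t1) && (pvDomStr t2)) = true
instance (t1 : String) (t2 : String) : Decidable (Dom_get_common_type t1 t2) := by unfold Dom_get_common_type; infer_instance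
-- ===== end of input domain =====

-- B replaces A's nine-branch equality cascade by a bool→int normalization plus a precedence-rank
-- table lookup (objective: idiomatic; no speed claim).

-- ===== PORT A =====
def cppTypes : PySem.Dict String String := PySem.Dict.mk
  [("int", "int"), ("float", "float"), ("string", "std::string"), ("bool", "bool"),
   ("double", "double"), ("long", "long"), ("long_long", "long long"),
   ("long_double", "long double"), ("uint", "unsigned int"), ("ulong", "unsigned long"),
   ("ulong_long", "unsigned long long"), ("list", "List"), ("set", "Set"),
   ("dict", "Dict"), ("orderedset", "OrderedSet"), ("ordereddict", "OrderedDict"),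
   ("graph", "Graph")]

-- literal transliteration of A's recursive cascade; cpp_types[t1] on a missing key is a
-- KeyError in Python (excluded by Pre_), rendered here as getD "" outside Pre_
def get_common_type (t1 : String) (t2 : String) : String :=
  if t1 = "bool" ∧ t2 = "bool" then "int"
  else if t1 = "bool" then get_common_type "int" t2
  else if t2 = "bool" then get_common_type t1 "int"
  else if t1 = t2 then (cppTypes.get? t1).getD ""
  else if t1 = "long_double" ∨ t2 = "long_double" then "long double"
  else if t1 = "double" ∨ t2 = "double" then "double"
  else if t1 = "float" ∨ t2 = "float" then "float"
  else if t1 = "long_long" ∨ t2 = "long_long" then "long long"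
  else if t1 = "ulong_long" ∨ t2 = "ulong_long" then "unsigned long long"
  else if t1 = "long" ∨ t2 = "long" then "long"
  else if t1 = "ulong" ∨ t2 = "ulong" then "unsigned long"
  else if t1 = "int" ∨ t2 = "int" then "int"
  else if t1 = "uint" ∨ t2 = "uint" then "unsigned int"
  else "long long"
termination_by (if t1 = "bool" then 1 else 0) + (if t2 = "bool" then 1 else 0)
decreasing_by all_goals simp_all

-- ===== PORT B =====
def rankDict : PySem.Dict String Int := PySem.Dict.mk
  [("long_double", 9), ("double", 8), ("float", 7), ("long_long", 6),
   ("ulong_long", 5), ("long", 4), ("ulong", 3), ("int", 2), ("uint", 1)]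

def get_common_type_alt (t1 : String) (t2 : String) : String :=
  let n1 := if t1 = "bool" then "int" else t1
  let n2 := if t2 = "bool" then "int" else t2
  if n1 = n2 then (cppTypes.get? n1).getD ""   -- KeyError outside Pre_
  else
    let r1 := rankDict.getD n1 0
    let r2 := rankDict.getD n2 0
    if r1 = 0 ∧ r2 = 0 then "long long"
    else (cppTypes.get? (if r1 > r2 then n1 else n2)).getD ""

-- ===== PRECONDITION & SPEC =====
-- Pre_ excludes exactly the inputs where Python A raises KeyError: both names normalize
-- (bool→int) to the same unknown type name; B raises KeyError there too.
def Pre_get_common_type (t1 : String) (t2 : String) : Prop :=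
  ((if t1 = "bool" then "int" else t1) = (if t2 = "bool" then "int" else t2)) →
    (if t1 = "bool" then "int" else t1) ∈
      ["int", "float", "string", "double", "long", "long_long", "long_double",
       "uint", "ulong", "ulong_long", "list", "set", "dict", "orderedset",
       "ordereddict", "graph"]
instance (t1 : String) (t2 : String) : Decidable (Pre_get_common_type t1 t2) := by unfold Pre_get_common_type; infer_instance

def pvWitness_get_common_type : String × String := ("float", "int")

def Spec_get_common_type (t1 : String) (t2 : String) (out : String) : Prop := out = get_common_type_alt t1 t2
instance (t1 : String) (t2 : String) (out : String) : Decidable (Spec_get_common_type t1 t2 out) := by unfold Spec_get_common_type; infer_instance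

-- ===== CLAIM (what is proved, stated in full; the proofs are below) =====
def Claim_equal_get_common_type : Prop := ∀ (t1 : String) (t2 : String), Dom_get_common_type t1 t2 → Pre_get_common_type t1 t2 → Spec_get_common_type t1 t2 (get_common_type t1 t2)

-- ===== LEMMAS AND PROOFS =====

-- helper: an unranked name has rank 0
lemma rank0 (t : String) (h1 : t ≠ "long_double") (h2 : t ≠ "double") (h3 : t ≠ "float")
    (h4 : t ≠ "long_long") (h5 : t ≠ "ulong_long") (h6 : t ≠ "long") (h7 : t ≠ "ulong")
    (h8 : t ≠ "int") (h9 : t ≠ "uint") : rankDict.getD t 0 = 0 := by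
  simp [rankDict, PySem.Dict.getD, PySem.Dict.get?,
        Ne.symm h1, Ne.symm h2, Ne.symm h3, Ne.symm h4, Ne.symm h5, Ne.symm h6, Ne.symm h7,
        Ne.symm h8, Ne.symm h9]

set_option maxHeartbeats 2000000 in
-- the non-bool case: the cascade agrees with the rank-table computation
lemma noBool_eq (t1 t2 : String) (h1 : t1 ≠ "bool") (h2 : t2 ≠ "bool")
    (hpre : Pre_get_common_type t1 t2) :
    get_common_type t1 t2 = get_common_type_alt t1 t2 := by
  unfold Pre_get_common_type at hpre
  rw [get_common_type]
  unfold get_common_type_alt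
  simp only [h1, h2, if_false, if_neg (by simp [h1] : ¬(t1 = "bool" ∧ t2 = "bool"))]
  by_cases e : t1 = t2
  · subst e; simp
  · simp only [if_neg e] at hpre ⊢
    simp only [if_neg h1, if_neg h2] at hpre ⊢
    have c1 : t1 = "long_double" ∨ t1 = "double" ∨ t1 = "float" ∨ t1 = "long_long" ∨
        t1 = "ulong_long" ∨ t1 = "long" ∨ t1 = "ulong" ∨ t1 = "int" ∨ t1 = "uint" ∨
        (t1 ≠ "long_double" ∧ t1 ≠ "double" ∧ t1 ≠ "float" ∧ t1 ≠ "long_long" ∧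
         t1 ≠ "ulong_long" ∧ t1 ≠ "long" ∧ t1 ≠ "ulong" ∧ t1 ≠ "int" ∧ t1 ≠ "uint") := by
      tauto
    have c2 : t2 = "long_double" ∨ t2 = "double" ∨ t2 = "float" ∨ t2 = "long_long" ∨
        t2 = "ulong_long" ∨ t2 = "long" ∨ t2 = "ulong" ∨ t2 = "int" ∨ t2 = "uint" ∨
        (t2 ≠ "long_double" ∧ t2 ≠ "double" ∧ t2 ≠ "float" ∧ t2 ≠ "long_long" ∧
         t2 ≠ "ulong_long" ∧ t2 ≠ "long" ∧ t2 ≠ "ulong" ∧ t2 ≠ "int" ∧ t2 ≠ "uint") := by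
      tauto
    rcases c1 with h|h|h|h|h|h|h|h|h|⟨f1,f2,f3,f4,f5,f6,f7,f8,f9⟩ <;>
      rcases c2 with g|g|g|g|g|g|g|g|g|⟨g1,g2,g3,g4,g5,g6,g7,g8,g9⟩ <;>
      first
        | (subst h; subst g; decide)
        | (subst h; rw [rank0 t2 g1 g2 g3 g4 g5 g6 g7 g8 g9];
           simp [cppTypes, rankDict, PySem.Dict.getD, PySem.Dict.get?, e,
                 g1, g2, g3, g4, g5, g6, g7, g8, g9])
        | (subst g; rw [rank0 t1 f1 f2 f3 f4 f5 f6 f7 f8 f9];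
           simp [cppTypes, rankDict, PySem.Dict.getD, PySem.Dict.get?, e,
                 f1, f2, f3, f4, f5, f6, f7, f8, f9])
        | (rw [rank0 t1 f1 f2 f3 f4 f5 f6 f7 f8 f9, rank0 t2 g1 g2 g3 g4 g5 g6 g7 g8 g9];
           simp [f1, f2, f3, f4, f5, f6, f7, f8, f9, g1, g2, g3, g4, g5, g6, g7, g8, g9])

-- ===== VERDICT (by name: the statement is the Claim_ definition above) =====
theorem get_common_type_spec : Claim_equal_get_common_type := by
  intro t1 t2 _ hpre
  unfold Spec_get_common_type
  by_cases h1 : t1 = "bool" <;> by_cases h2 : t2 = "bool"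
  · subst h1; subst h2
    rw [get_common_type, if_pos ⟨rfl, rfl⟩]
    decide
  · subst h1
    rw [get_common_type, if_neg (by simp [h2]), if_pos rfl]
    have hb : get_common_type_alt "bool" t2 = get_common_type_alt "int" t2 := by
      unfold get_common_type_alt; simp
    rw [hb]
    refine noBool_eq "int" t2 (by decide) h2 ?_
    unfold Pre_get_common_type at hpre ⊢
    simpa using hpre
  · subst h2
    rw [get_common_type, if_neg (by simp [h1]), if_neg h1, if_pos rfl]
    have hb : get_common_type_alt t1 "bool" = get_common_type_alt t1 "int" := by
      unfold get_common_type_alt; simp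
    rw [hb]
    refine noBool_eq t1 "int" h1 (by decide) ?_
    unfold Pre_get_common_type at hpre ⊢
    simpa using hpre
  · exact noBool_eq t1 t2 h1 h2 hpre
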